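-- pv_equiv track=rewrite | github.com/BenSmithers/MultiHex2 | core/utils.py | get_cardinal
-- ===== SOURCE A (Python) =====
-- def get_cardinal(number:int)->str:
--     """
--         Returns the cardinal thingy for the end of a number. Used for string formatting, ie,
--             1 --> st
--             2 --> nd
--             3 --> rd
--             4 --> th
--     """
--     _number = abs(number)
--     if number==0:
--         return "th"
--     elif _number==1:
--         return "st"
--     elif _number==2:
--         return "nd"
--     elif _number ==3:
--         return "rd"
--     elif _number <20:
--         return "th"
--     else:
--         ones = number % 10
--
--         return get_cardinal(ones)
-- ===== SOURCE B (Python) =====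
-- def get_cardinal(number: int) -> str:
--     """Standard English ordinal-suffix rule: teens (11/12/13 mod 100) take "th",
--     otherwise the suffix follows the last digit of abs(number)."""
--     n = abs(number)
--     if n % 100 in (11, 12, 13):
--         return "th"
--     return {1: "st", 2: "nd", 3: "rd"}.get(n % 10, "th")
-- ===== Notes on version B (the rewrite author's own statement) =====
-- stated objective: idiomatic
-- what changed: Replaced the <20 threshold, the if/elif chain and the one-level recursion on the signed number % 10 by the standard teens rule: 'th' when abs(number) % 100 is 11/12/13, otherwise the suffix of abs(number)'s last digit.
-- intended difference: On n >= 20 whose last two digits are eleven, twelve or thirteen A returns 'st'/'nd'/'rd' (111 -> 'st'), and on n <= -20 whose absolute value ends in a digit from one to three (outside those teens) or from seven to nine A applies the suffix table to the signed n % 10 (-27 -> 'rd', -21 -> 'th'); B returns the standard English ordinal suffix there ('111th', '-27th', '-21st'), which is what the docstring intends. — e.g. on get_cardinal(111): A returns "st", B returns "th"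
import Mathlib
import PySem

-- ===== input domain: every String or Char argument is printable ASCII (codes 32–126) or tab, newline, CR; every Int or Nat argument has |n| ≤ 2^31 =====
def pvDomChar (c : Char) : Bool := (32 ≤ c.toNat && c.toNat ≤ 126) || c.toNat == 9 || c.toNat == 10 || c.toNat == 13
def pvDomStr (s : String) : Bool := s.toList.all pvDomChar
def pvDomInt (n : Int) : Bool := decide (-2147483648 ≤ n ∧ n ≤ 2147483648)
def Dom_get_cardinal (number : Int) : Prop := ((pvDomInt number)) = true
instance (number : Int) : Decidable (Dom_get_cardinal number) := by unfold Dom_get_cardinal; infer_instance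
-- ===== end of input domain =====

-- B is the standard English ordinal-suffix rule (teens via %100, last digit of |n| via %10);
-- it differs from A exactly on the D_ region stated below, where A's value is an artefact
-- of recursing on the signed number % 10 (objective: idiomatic).

-- ===== PORT A =====
-- literal transliteration of A; the recursive call terminates because number % 10 ∈ [0,10)
def get_cardinal (number : Int) : String :=
  let _number := |number|
  if number = 0 then "th"
  else if _number = 1 then "st"
  else if _number = 2 then "nd"
  else if _number = 3 then "rd"
  else if _number < 20 then "th"
  else
    let ones := PySem.Int.mod number 10
    get_cardinal ones
termination_by number.natAbs
decreasing_by
  have h1 : 0 ≤ PySem.Int.mod number 10 := PySem.Int.mod_nonneg number (by norm_num)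
  have h2 : PySem.Int.mod number 10 < 10 := PySem.Int.mod_lt number (by norm_num)
  have h3 : 20 ≤ number.natAbs := by
    rcases abs_cases number with ⟨he, _⟩ | ⟨he, _⟩ <;> omega
  omega

-- ===== PORT B =====
def get_cardinal_alt (number : Int) : String :=
  let n := |number|
  if PySem.Int.mod n 100 = 11 ∨ PySem.Int.mod n 100 = 12 ∨ PySem.Int.mod n 100 = 13 then "th"
  else (PySem.Dict.ofList [((1:Int), "st"), (2, "nd"), (3, "rd")]).getD (PySem.Int.mod n 10) "th"

-- ===== PRECONDITION & SPEC =====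
-- On n ≥ 20 whose last two digits are eleven, twelve or thirteen A returns "st"/"nd"/"rd"
-- (111 → "st"), and on n ≤ -20 whose absolute value ends in a digit from one to three
-- (outside those teens) or from seven to nine A applies the suffix table to the signed
-- n % 10 (-27 → "rd", -21 → "th"); B returns the standard English ordinal suffix there
-- ("111th", "-27th", "-21st"), which is what the docstring intends.
def D_get_cardinal (number : Int) : Prop :=
  (20 ≤ number ∧ (number % 100 = 11 ∨ number % 100 = 12 ∨ number % 100 = 13)) ∨
  (number ≤ -20 ∧
    ((-number) % 10 = 7 ∨ (-number) % 10 = 8 ∨ (-number) % 10 = 9 ∨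
     (((-number) % 10 = 1 ∨ (-number) % 10 = 2 ∨ (-number) % 10 = 3) ∧
      (-number) % 100 ≠ (-number) % 10 + 10)))
instance (number : Int) : Decidable (D_get_cardinal number) := by unfold D_get_cardinal; infer_instance

def Spec_get_cardinal (number : Int) (out : String) : Prop := ¬ D_get_cardinal number → out = get_cardinal_alt number
instance (number : Int) (out : String) : Decidable (Spec_get_cardinal number out) := by unfold Spec_get_cardinal; infer_instance

def pvDiffWitness_get_cardinal : Int := 111
def pvDiffWitnessOut_get_cardinal : String × String := ("st", "th")

-- ===== CLAIM (what is proved, stated in full; the proofs are below) =====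
def Claim_unchanged_get_cardinal : Prop := ∀ (number : Int), Dom_get_cardinal number → Spec_get_cardinal number (get_cardinal number)
def Claim_changed_get_cardinal : Prop := Dom_get_cardinal (pvDiffWitness_get_cardinal) ∧ D_get_cardinal (pvDiffWitness_get_cardinal) ∧ get_cardinal (pvDiffWitness_get_cardinal) = pvDiffWitnessOut_get_cardinal.1 ∧ get_cardinal_alt (pvDiffWitness_get_cardinal) = pvDiffWitnessOut_get_cardinal.2 ∧ pvDiffWitnessOut_get_cardinal.1 ≠ pvDiffWitnessOut_get_cardinal.2
def Claim_exact_get_cardinal : Prop := ∀ (number : Int), Dom_get_cardinal number → D_get_cardinal number → get_cardinal number ≠ get_cardinal_alt number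

-- ===== LEMMAS AND PROOFS =====

-- A on inputs with |n| < 20 reduces to its explicit branch chain
theorem A_small (n : Int) (h : |n| < 20) :
    get_cardinal n =
      if |n| = 1 then "st" else if |n| = 2 then "nd" else if |n| = 3 then "rd" else "th" := by
  rw [get_cardinal]
  by_cases h0 : n = 0
  · subst h0; decide
  · simp only [if_neg h0]
    have : ¬ (20 ≤ |n|) := by omega
    split_ifs <;> simp_all

-- A on |n| ≥ 20 takes one recursive step to the small case on the signed mod
theorem A_big (n : Int) (h : 20 ≤ |n|) :
    get_cardinal n =
      if PySem.Int.mod n 10 = 1 then "st" else if PySem.Int.mod n 10 = 2 then "nd"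
      else if PySem.Int.mod n 10 = 3 then "rd" else "th" := by
  have h0 : 0 ≤ PySem.Int.mod n 10 := PySem.Int.mod_nonneg n (by norm_num)
  have h2 : PySem.Int.mod n 10 < 10 := PySem.Int.mod_lt n (by norm_num)
  rw [get_cardinal]
  have hne : ¬ n = 0 := by intro h'; subst h'; simp at h
  have h1 : ¬ |n| = 1 := by omega
  have h2' : ¬ |n| = 2 := by omega
  have h3 : ¬ |n| = 3 := by omega
  have h4 : ¬ |n| < 20 := by omega
  simp only [if_neg hne, if_neg h1, if_neg h2', if_neg h3, if_neg h4]
  rw [A_small (PySem.Int.mod n 10) (by rw [abs_of_nonneg h0]; omega)]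
  rw [abs_of_nonneg h0]

-- B rewritten through emod of |n| (PySem.Int.mod with a positive divisor is emod)
theorem alt_eval (n : Int) :
    get_cardinal_alt n =
      if |n| % 100 = 11 ∨ |n| % 100 = 12 ∨ |n| % 100 = 13 then "th"
      else if |n| % 10 = 1 then "st" else if |n| % 10 = 2 then "nd"
      else if |n| % 10 = 3 then "rd" else "th" := by
  simp only [get_cardinal_alt,
    PySem.Int.mod_eq_emod_of_pos (a := |n|) (b := 100) (by norm_num),
    PySem.Int.mod_eq_emod_of_pos (a := |n|) (b := 10) (by norm_num)]
  by_cases h1 : |n| % 100 = 11 ∨ |n| % 100 = 12 ∨ |n| % 100 = 13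
  · rw [if_pos h1, if_pos h1]
  · rw [if_neg h1, if_neg h1]
    have h0 : 0 ≤ |n| % 10 := Int.emod_nonneg _ (by norm_num)
    have hlt : |n| % 10 < 10 := Int.emod_lt_of_pos _ (by norm_num)
    simp only [PySem.Dict.getD, PySem.Dict.get?, PySem.Dict.ofList]
    set m := |n| % 10 with hm
    interval_cases m <;> decide

-- relation between the signed Python mod used by A and |n| % 10 used by B
theorem mod_signed_neg (n : Int) (_hn : n < 0) :
    PySem.Int.mod n 10 = (10 - (-n) % 10) % 10 := by
  have h1 : 0 ≤ PySem.Int.mod n 10 := PySem.Int.mod_nonneg n (by norm_num)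
  have h2 : PySem.Int.mod n 10 < 10 := PySem.Int.mod_lt n (by norm_num)
  have h3 := PySem.Int.floordiv_mul_add_mod n 10
  have h4 : 0 ≤ (-n) % 10 := Int.emod_nonneg _ (by norm_num)
  have h5 : (-n) % 10 < 10 := Int.emod_lt_of_pos _ (by norm_num)
  have h6 := Int.emod_add_ediv (-n) 10
  have h7 : 0 ≤ (10 - (-n) % 10) % 10 := Int.emod_nonneg _ (by norm_num)
  have h8 : (10 - (-n) % 10) % 10 < 10 := Int.emod_lt_of_pos _ (by norm_num)
  have h9 := Int.emod_add_ediv (10 - (-n) % 10) 10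
  omega

theorem unchanged_all (n : Int) (hnD : ¬ D_get_cardinal n) :
    get_cardinal n = get_cardinal_alt n := by
  rw [alt_eval]
  by_cases hs : |n| < 20
  · -- small range: both are the explicit branch chain on |n|
    rw [A_small n hs]
    have h0 : 0 ≤ |n| := abs_nonneg n
    have h100 : |n| % 100 = |n| := Int.emod_eq_of_lt h0 (by omega)
    have h10 := Int.emod_add_ediv |n| 10
    have h10a : 0 ≤ |n| % 10 := Int.emod_nonneg _ (by norm_num)
    have h10b : |n| % 10 < 10 := Int.emod_lt_of_pos _ (by norm_num)
    rw [h100]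
    set m := |n| with hm
    split_ifs <;> first | rfl | omega
  · rw [A_big n (by omega)]
    rcases lt_or_ge n 0 with hneg | hpos
    · -- n ≤ -20
      have habs : |n| = -n := abs_of_neg hneg
      rw [habs]
      have hsm := mod_signed_neg n hneg
      have h4 : 0 ≤ (-n) % 10 := Int.emod_nonneg _ (by norm_num)
      have h5 : (-n) % 10 < 10 := Int.emod_lt_of_pos _ (by norm_num)
      have hc : 0 ≤ (-n) % 100 := Int.emod_nonneg _ (by norm_num)
      have hc2 : (-n) % 100 < 100 := Int.emod_lt_of_pos _ (by norm_num)
      have hcd : (-n) % 100 % 10 = (-n) % 10 := by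
        rw [Int.emod_emod_of_dvd _ (by norm_num)]
      have hD : ¬ (20 ≤ -n ∧
          ((-n) % 10 = 7 ∨ (-n) % 10 = 8 ∨ (-n) % 10 = 9 ∨
           (((-n) % 10 = 1 ∨ (-n) % 10 = 2 ∨ (-n) % 10 = 3) ∧
            (-n) % 100 ≠ (-n) % 10 + 10))) := by
        intro h; exact hnD (Or.inr ⟨by omega, h.2⟩)
      have hge : 20 ≤ -n := by omega
      -- case on the last digit d of |n|
      have hd9 := h5
      rw [hsm]
      have hmod : ∀ k : Int, 0 ≤ k → k < 10 → (10 - k) % 10 = if k = 0 then 0 else 10 - k := by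
        intro k hk1 hk2
        split_ifs with hk0
        · subst hk0; decide
        · exact Int.emod_eq_of_lt (by omega) (by omega)
      rw [hmod _ h4 h5]
      split_ifs <;> first | rfl | omega
    · -- 20 ≤ n
      have habs : |n| = n := abs_of_nonneg hpos
      rw [habs]
      have hsm : PySem.Int.mod n 10 = n % 10 :=
        PySem.Int.mod_eq_emod_of_pos (by norm_num)
      have hcd : n % 100 % 10 = n % 10 := by
        rw [Int.emod_emod_of_dvd _ (by norm_num)]
      have hD : ¬ (20 ≤ n ∧ (n % 100 = 11 ∨ n % 100 = 12 ∨ n % 100 = 13)) := by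
        intro h; exact hnD (Or.inl h)
      have hge : 20 ≤ n := by omega
      have hnt : ¬ (n % 100 = 11 ∨ n % 100 = 12 ∨ n % 100 = 13) := fun h => hD ⟨hge, h⟩
      rw [hsm]
      split_ifs <;> first | rfl | omega

theorem exact_all (n : Int) (hD : D_get_cardinal n) :
    get_cardinal n ≠ get_cardinal_alt n := by
  rw [alt_eval]
  rcases hD with ⟨hge, hmod⟩ | ⟨hle, hcase⟩
  · -- 20 ≤ n, n % 100 ∈ {11,12,13}: A gives st/nd/rd, B gives th
    have habs : |n| = n := abs_of_nonneg (by omega)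
    rw [A_big n (by omega), habs]
    have hsm : PySem.Int.mod n 10 = n % 10 :=
      PySem.Int.mod_eq_emod_of_pos (by norm_num)
    have hcd : n % 100 % 10 = n % 10 := by
      rw [Int.emod_emod_of_dvd _ (by norm_num)]
    rw [hsm]
    rw [if_pos hmod]
    split_ifs <;> first | omega | decide
  · -- n ≤ -20
    have hneg : n < 0 := by omega
    have habs : |n| = -n := abs_of_neg hneg
    rw [A_big n (by omega), habs, mod_signed_neg n hneg]
    have h4 : 0 ≤ (-n) % 10 := Int.emod_nonneg _ (by norm_num)
    have h5 : (-n) % 10 < 10 := Int.emod_lt_of_pos _ (by norm_num)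
    have hc : 0 ≤ (-n) % 100 := Int.emod_nonneg _ (by norm_num)
    have hc2 : (-n) % 100 < 100 := Int.emod_lt_of_pos _ (by norm_num)
    have hcd : (-n) % 100 % 10 = (-n) % 10 := by
      rw [Int.emod_emod_of_dvd _ (by norm_num)]
    have hmod : ∀ k : Int, 0 ≤ k → k < 10 → (10 - k) % 10 = if k = 0 then 0 else 10 - k := by
      intro k hk1 hk2
      split_ifs with hk0
      · subst hk0; decide
      · exact Int.emod_eq_of_lt (by omega) (by omega)
    rw [hmod _ h4 h5]
    split_ifs <;> first | omega | decide

-- ===== VERDICT (by name: the statement is the Claim_ definitions above) =====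
theorem get_cardinal_spec : Claim_unchanged_get_cardinal := by
  intro n _ hnD
  exact (unchanged_all n hnD).symm ▸ rfl

theorem get_cardinal_changed : Claim_changed_get_cardinal := by
  unfold Claim_changed_get_cardinal
  refine ⟨by decide, by decide, ?_, by decide, by decide⟩
  show get_cardinal 111 = "st"
  rw [A_big 111 (by decide)]; decide

theorem get_cardinal_tight : Claim_exact_get_cardinal := by
  intro n _ hD
  exact exact_all n hD
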